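-- pv_equiv track=rewrite | github.com/kokok22/Algorithm | Programmers/Level_1/Sort String.py | solution
-- ===== SOURCE A (Python) =====
-- def solution(strs):
--     up = []
--     low = []
--
--     for s in strs:
--         if s.islower():
--             low.append(s)
--         else:
--             up.append(s)
--
--     up.sort(reverse=True)
--     low.sort(reverse=True)
--
--     return ''.join(low+up)
-- ===== SOURCE B (Python) =====
-- def solution(strs):
--     # one stable sort with a composite key instead of partition + two sorts:
--     # reverse=True puts islower()==True strings first (True > False) and each
--     # group's strings in descending order.
--     return ''.join(sorted(strs, key=lambda s: (s.islower(), s), reverse=True))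
-- ===== Notes on version B (the rewrite author's own statement) =====
-- stated objective: idiomatic
-- what changed: Replaces the explicit partition loop and two separate descending sorts with a single sorted() call whose composite key (s.islower(), s) under reverse=True yields the lowercase group descending followed by the rest descending.
import Mathlib
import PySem

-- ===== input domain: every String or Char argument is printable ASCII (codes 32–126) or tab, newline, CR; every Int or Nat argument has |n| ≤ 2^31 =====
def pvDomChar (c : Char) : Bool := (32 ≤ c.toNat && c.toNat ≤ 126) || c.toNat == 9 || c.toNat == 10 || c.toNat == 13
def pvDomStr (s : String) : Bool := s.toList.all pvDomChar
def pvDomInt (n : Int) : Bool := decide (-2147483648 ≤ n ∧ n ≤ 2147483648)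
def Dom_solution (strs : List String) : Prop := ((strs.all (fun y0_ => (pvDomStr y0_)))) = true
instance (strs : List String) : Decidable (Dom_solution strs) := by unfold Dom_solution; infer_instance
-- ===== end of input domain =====

-- B replaces A's partition loop + two descending sorts by one sorted() call with the
-- composite key (s.islower(), s) and reverse=True (same task, idiomatic one-liner).

-- s.islower(): at least one cased character and no uppercase one (exact on the ASCII domain,
-- where the cased characters are exactly the letters)
def pyIslowerStr (s : String) : Bool :=
  s.toList.any PySem.Chars.islower && !(s.toList.any PySem.Chars.isupper)

-- ===== PORT A =====
def solution (strs : List String) : String :=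
  -- for s in strs: if s.islower(): low.append(s) else: up.append(s)   (state = (up, low))
  let p := strs.foldl
    (fun (acc : List String × List String) s =>
      if pyIslowerStr s then (acc.1, acc.2 ++ [s]) else (acc.1 ++ [s], acc.2))
    ([], [])
  -- up.sort(reverse=True); low.sort(reverse=True); return ''.join(low+up)
  PySem.Str.join "" (PySem.List.sorted p.2 (fun x => x) true ++ PySem.List.sorted p.1 (fun x => x) true)

-- ===== PORT B =====
-- Python's tuple key (s.islower(), s) compares lexicographically with bool as 0/1;
-- that is exactly the Lex (Bool × String) order (false < true, then string order).
def solKey (s : String) : Lex (Bool × String) := toLex (pyIslowerStr s, s)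

def solution_alt (strs : List String) : String :=
  PySem.Str.join "" (PySem.List.sorted strs solKey true)

-- ===== PRECONDITION & SPEC =====
def Spec_solution (strs : List String) (out : String) : Prop := out = solution_alt strs
instance (strs : List String) (out : String) : Decidable (Spec_solution strs out) := by unfold Spec_solution; infer_instance

-- ===== CLAIM (what is proved, stated in full; the proofs are below) =====
def Claim_equal_solution : Prop := ∀ (strs : List String), Dom_solution strs → Spec_solution strs (solution strs)

-- ===== LEMMAS AND PROOFS =====

-- A's partition loop is the pair of filters (appended to the incoming accumulators)
lemma solution_loop_eq (strs : List String) (u l : List String) :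
    strs.foldl
      (fun (acc : List String × List String) s =>
        if pyIslowerStr s then (acc.1, acc.2 ++ [s]) else (acc.1 ++ [s], acc.2))
      (u, l)
    = (u ++ strs.filter (fun s => !pyIslowerStr s), l ++ strs.filter (fun s => pyIslowerStr s)) := by
  induction strs generalizing u l with
  | nil => simp
  | cons x xs ih =>
    by_cases hx : pyIslowerStr x = true <;>
      simp [List.foldl_cons, hx, ih]

lemma solKey_injective : Function.Injective solKey := by
  intro a b h
  have : (pyIslowerStr a, a) = (pyIslowerStr b, b) := toLex.injective h
  exact (Prod.mk.injEq _ _ _ _).mp this |>.2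

-- the single keyed reverse-sort IS low-descending ++ up-descending
lemma sorted_solKey_eq (strs : List String) :
    PySem.List.sorted strs solKey true
    = PySem.List.sorted (strs.filter (fun s => pyIslowerStr s)) (fun x => x) true
      ++ PySem.List.sorted (strs.filter (fun s => !pyIslowerStr s)) (fun x => x) true := by
  apply PySem.List.eq_of_perm_of_pairwise_le_of_injective
    (key := fun s => OrderDual.toDual (solKey s))
  · exact fun a b h => solKey_injective (OrderDual.toDual.injective h)
  · exact (PySem.List.sorted_perm strs solKey true).trans
      (((PySem.List.sorted_perm _ _ true).append (PySem.List.sorted_perm _ _ true)).trans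
        (List.filter_append_perm _ strs)).symm
  · exact (PySem.List.sorted_pairwise_rev strs solKey).imp
      (fun h => OrderDual.toDual_le_toDual.mpr h)
  · rw [List.pairwise_append]
    refine ⟨?_, ?_, ?_⟩
    · refine ((PySem.List.sorted_pairwise_rev _ (fun x => x)).imp_of_mem ?_)
      intro a b ha hb hba
      have ha' := (List.mem_filter.mp ((PySem.List.mem_sorted _ _ _ _).mp ha)).2
      have hb' := (List.mem_filter.mp ((PySem.List.mem_sorted _ _ _ _).mp hb)).2
      refine OrderDual.toDual_le_toDual.mpr ?_
      exact Prod.Lex.toLex_le_toLex.mpr (Or.inr ⟨by rw [hb', ha'], hba⟩)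
    · refine ((PySem.List.sorted_pairwise_rev _ (fun x => x)).imp_of_mem ?_)
      intro a b ha hb hba
      have ha' := (List.mem_filter.mp ((PySem.List.mem_sorted _ _ _ _).mp ha)).2
      have hb' := (List.mem_filter.mp ((PySem.List.mem_sorted _ _ _ _).mp hb)).2
      refine OrderDual.toDual_le_toDual.mpr ?_
      refine Prod.Lex.toLex_le_toLex.mpr (Or.inr ⟨?_, hba⟩)
      simp only [Bool.not_eq_eq_eq_not, Bool.not_true] at ha' hb'
      rw [ha', hb']
    · intro a ha b hb
      have ha' := (List.mem_filter.mp ((PySem.List.mem_sorted _ _ _ _).mp ha)).2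
      have hb' := (List.mem_filter.mp ((PySem.List.mem_sorted _ _ _ _).mp hb)).2
      simp only [Bool.not_eq_eq_eq_not, Bool.not_true] at hb'
      refine OrderDual.toDual_le_toDual.mpr ?_
      exact Prod.Lex.toLex_le_toLex.mpr (Or.inl (by rw [ha', hb']; exact Bool.false_lt_true))

-- ===== VERDICT (by name: the statement is the Claim_ definition above) =====
theorem solution_spec : Claim_equal_solution := by
  intro strs _
  show solution strs = solution_alt strs
  rw [solution, solution_alt, solution_loop_eq strs [] [], sorted_solKey_eq strs]
  simp
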